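-- pv_equiv track=rewrite | github.com/ishitachaturvedi/gpgpu-sim_distribution | fast_v2_indep_SM_sched.py | init_eight_final
-- ===== SOURCE A (Python) =====
-- def init_eight_final(numStalls):
--     warp_eight_c = []
--     for i in range(numStalls):
--         stall1 = []
--         for j in range(i+1,numStalls):
--             stall2 = []
--             for k in range(j+1,numStalls):
--                 stall3 = []
--                 for k1 in range(k+1,numStalls):
--                     stall4 = []
--                     for k2 in range(k1+1,numStalls):
--                         stall5 = []
--                         for k3 in range(k2+1,numStalls):
--                             stall6 = []
--                             for k4 in range(k3+1,numStalls):
--                                 stall7 = []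
--                                 for k5 in range(k4+1,numStalls):
--                                     temp1=[]
--                                     temp1.append(0)
--                                     temp1.append(0)
--                                     stall7.append(temp1)
--                                 stall6.append(stall7)
--                             stall5.append(stall6)
--                         stall4.append(stall5)
--                     stall3.append(stall4)
--                 stall2.append(stall3)
--             stall1.append(stall2)
--         warp_eight_c.append(stall1)
--     return warp_eight_c
-- ===== SOURCE B (Python) =====
-- def init_eight_final(numStalls):
--     def build(start, depth):
--         if depth == 1:
--             return [[0, 0] for _ in range(start, numStalls)]
--         return [build(i + 1, depth - 1) for i in range(start, numStalls)]
--     return build(0, 8)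
-- ===== Notes on version B (the rewrite author's own statement) =====
-- stated objective: simpler
-- what changed: Replaces the 8 hand-unrolled nested append loops with one recursive helper build(start, depth) that recurses on depth (base case depth==1 builds the row of [0,0] leaves) and starts each range at the next index.
import Mathlib
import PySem

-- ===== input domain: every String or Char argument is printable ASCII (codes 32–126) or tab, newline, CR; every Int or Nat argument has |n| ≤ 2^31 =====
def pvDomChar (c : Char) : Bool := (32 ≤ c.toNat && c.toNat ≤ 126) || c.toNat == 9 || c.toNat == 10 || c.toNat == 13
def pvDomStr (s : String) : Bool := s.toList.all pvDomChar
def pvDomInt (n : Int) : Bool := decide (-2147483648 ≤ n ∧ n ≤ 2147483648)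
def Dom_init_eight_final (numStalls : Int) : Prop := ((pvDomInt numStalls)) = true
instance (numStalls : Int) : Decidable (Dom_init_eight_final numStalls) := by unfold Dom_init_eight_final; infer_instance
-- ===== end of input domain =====

-- B replaces A's 8 hand-unrolled nested loops with one recursive helper build(start, depth); objective: simpler.

-- ===== PORT A =====
-- each 'for … : acc.append(e)' loop is a foldl appending to its accumulator list
def init_eight_final (numStalls : Int) : List (List (List (List (List (List (List (List (List Int)))))))) :=
  (PySem.List.pyRange 0 numStalls 1).foldl (fun warp_eight_c i =>
    warp_eight_c ++ [
      (PySem.List.pyRange (i+1) numStalls 1).foldl (fun stall1 j =>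
        stall1 ++ [
          (PySem.List.pyRange (j+1) numStalls 1).foldl (fun stall2 k =>
            stall2 ++ [
              (PySem.List.pyRange (k+1) numStalls 1).foldl (fun stall3 k1 =>
                stall3 ++ [
                  (PySem.List.pyRange (k1+1) numStalls 1).foldl (fun stall4 k2 =>
                    stall4 ++ [
                      (PySem.List.pyRange (k2+1) numStalls 1).foldl (fun stall5 k3 =>
                        stall5 ++ [
                          (PySem.List.pyRange (k3+1) numStalls 1).foldl (fun stall6 k4 =>
                            stall6 ++ [
                              (PySem.List.pyRange (k4+1) numStalls 1).foldl (fun stall7 _k5 =>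
                                stall7 ++ [([] : List Int) ++ [0] ++ [0]]) []
                            ]) []
                        ]) []
                    ]) []
                ]) []
            ]) []
        ]) []
    ]) []

-- ===== PORT B =====
-- type of the result of build at recursion depth d
def pvNested : Nat → Type
  | 0 => List Int
  | d + 1 => List (pvNested d)

-- build(start, depth) at depth = d+1: one comprehension of [0,0] rows when depth == 1,
-- else a comprehension of recursive calls over range(start, numStalls)
def pvBuild (numStalls : Int) : (d : Nat) → Int → pvNested (d + 1)
  | 0, start => (PySem.List.pyRange start numStalls 1).map (fun _ => ([0, 0] : List Int))
  | d + 1, start => (PySem.List.pyRange start numStalls 1).map (fun i => pvBuild numStalls d (i + 1))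

def init_eight_final_alt (numStalls : Int) : List (List (List (List (List (List (List (List (List Int)))))))) :=
  pvBuild numStalls 7 0

-- ===== PRECONDITION & SPEC =====
-- abbreviation for the result type (only so the Decidable instance's binder stays readable)
abbrev pvOut : Type := List (List (List (List (List (List (List (List (List Int))))))))
def Spec_init_eight_final (numStalls : Int) (out : List (List (List (List (List (List (List (List (List Int))))))))) : Prop := out = init_eight_final_alt numStalls
instance (numStalls : Int) (out : pvOut) : Decidable (Spec_init_eight_final numStalls out) := by unfold Spec_init_eight_final; infer_instance

-- ===== CLAIM (what is proved, stated in full; the proofs are below) =====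
def Claim_equal_init_eight_final : Prop := ∀ (numStalls : Int), Dom_init_eight_final numStalls → Spec_init_eight_final numStalls (init_eight_final numStalls)

-- ===== LEMMAS AND PROOFS =====

-- an append-accumulating foldl is a map
theorem pv_foldl_append_map {α β : Type} (f : α → β) (l : List α) (acc : List β) :
    l.foldl (fun a x => a ++ [f x]) acc = acc ++ l.map f := by
  induction l generalizing acc with
  | nil => simp
  | cons x xs ih => simp [List.foldl_cons, ih]

-- ===== VERDICT (by name: the statement is the Claim_ definition above) =====
theorem init_eight_final_spec : Claim_equal_init_eight_final := by
  intro numStalls _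
  unfold Spec_init_eight_final init_eight_final init_eight_final_alt
  simp only [pv_foldl_append_map, List.nil_append, pvBuild, List.singleton_append]
  rfl
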